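-- pv_equiv track=rewrite | github.com/matheus-konrath/TCC | petroleo.py | reduce_signals
-- ===== SOURCE A (Python) =====
-- def reduce_signals(signals, min_distance=10):
--     reduced_signals = []
--     last_signal = -min_distance  # Inicializando o último sinal como fora do alcance
--     for i in range(len(signals)):
--         if signals[i] and (i - last_signal) >= min_distance:
--             reduced_signals.append(i)
--             last_signal = i
--     return reduced_signals
-- ===== SOURCE B (Python) =====
-- def reduce_signals(signals, min_distance=10):
--     # Alternative decomposition: a while loop over a manually advanced index.
--     # After accepting a truthy index we jump straight past the ineligible window
--     # (min_distance positions), so no last-accepted accumulator or distance test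
--     # is needed.
--     out = []
--     step = min_distance if min_distance > 0 else 1
--     i = 0
--     n = len(signals)
--     while i < n:
--         if signals[i]:
--             out.append(i)
--             i += step
--         else:
--             i += 1
--     return out
-- ===== Notes on version B (the rewrite author's own statement) =====
-- stated objective: alternative
-- what changed: Replaces the for-loop that carries a last-accepted-index accumulator and tests (i - last) >= min_distance at every index by a while loop over a manually advanced index that, on accepting a truthy index, jumps min_distance positions past the ineligible window (advancing by 1 otherwise), eliminating the accumulator and the per-index distance test.
import Mathlib
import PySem

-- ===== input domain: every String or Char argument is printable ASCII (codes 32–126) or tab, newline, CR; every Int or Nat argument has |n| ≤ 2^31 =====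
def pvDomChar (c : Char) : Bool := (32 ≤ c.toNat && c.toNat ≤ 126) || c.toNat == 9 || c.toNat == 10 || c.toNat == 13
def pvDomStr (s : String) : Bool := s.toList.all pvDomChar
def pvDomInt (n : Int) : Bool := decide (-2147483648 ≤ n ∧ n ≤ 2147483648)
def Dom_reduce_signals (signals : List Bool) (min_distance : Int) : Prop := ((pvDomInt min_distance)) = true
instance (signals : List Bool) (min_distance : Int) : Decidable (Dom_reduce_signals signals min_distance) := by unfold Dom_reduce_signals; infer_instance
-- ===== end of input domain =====

-- B replaces A's last-accepted accumulator and per-index distance test by a while loop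
-- that jumps past the ineligible window after each accepted index (objective: alternative).

-- ===== PORT A =====
def reduce_signals (signals : List Bool) (min_distance : Int) : List Int :=
  ((PySem.List.pyRange 0 signals.length 1).foldl
    (fun (st : List Int × Int) i =>
      if PySem.List.pyGetD signals i false = true ∧ i - st.2 ≥ min_distance then
        (st.1 ++ [i], i)
      else st)
    (([] : List Int), -min_distance)).1

-- ===== PORT B =====
-- the while loop of Source B, as recursion on the advancing index
def pvBLoop (signals : List Bool) (step : Nat) (i : Nat) : List Int :=
  if h : i < signals.length then
    if signals.getD i false then
      (i : Int) :: pvBLoop signals step (i + max step 1)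
    else pvBLoop signals step (i + 1)
  else []
termination_by signals.length - i
decreasing_by all_goals omega

def reduce_signals_alt (signals : List Bool) (min_distance : Int) : List Int :=
  pvBLoop signals (if min_distance > 0 then min_distance.toNat else 1) 0

-- ===== PRECONDITION & SPEC =====
def Spec_reduce_signals (signals : List Bool) (min_distance : Int) (out : List Int) : Prop := out = reduce_signals_alt signals min_distance
instance (signals : List Bool) (min_distance : Int) (out : List Int) : Decidable (Spec_reduce_signals signals min_distance out) := by unfold Spec_reduce_signals; infer_instance

-- ===== CLAIM (what is proved, stated in full; the proofs are below) =====
def Claim_equal_reduce_signals : Prop := ∀ (signals : List Bool) (min_distance : Int), Dom_reduce_signals signals min_distance → Spec_reduce_signals signals min_distance (reduce_signals signals min_distance)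

-- ===== LEMMAS AND PROOFS =====

-- A's loop, as recursion on the index (proof helper)
def pvALoop (signals : List Bool) (md : Int) (i : Nat) (last : Int) : List Int :=
  if h : i < signals.length then
    if signals.getD i false = true ∧ (i : Int) - last ≥ md then
      (i : Int) :: pvALoop signals md (i + 1) i
    else pvALoop signals md (i + 1) last
  else []
termination_by signals.length - i
decreasing_by all_goals omega

-- A's foldl over the index range equals pvALoop with an append accumulator
theorem pv_fold_eq (signals : List Bool) (md : Int) :
    ∀ (n i : Nat) (acc : List Int) (last : Int), signals.length - i ≤ n →
    ((PySem.List.pyRange i signals.length 1).foldl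
      (fun (st : List Int × Int) j =>
        if PySem.List.pyGetD signals j false = true ∧ j - st.2 ≥ md then
          (st.1 ++ [j], j)
        else st)
      (acc, last)).1 = acc ++ pvALoop signals md i last := by
  intro n
  induction n with
  | zero =>
    intro i acc last h
    rw [PySem.List.pyRange_one_eq_nil (by omega), pvALoop, dif_neg (by omega)]
    simp
  | succ n ih =>
    intro i acc last h
    by_cases hl : i < signals.length
    · rw [PySem.List.pyRange_one_cons (by exact_mod_cast hl), List.foldl_cons, pvALoop,
        dif_pos hl]
      simp only [PySem.List.pyGetD_natCast, List.getD_eq_getElem?_getD]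
      split_ifs with hc
      · have := ih (i + 1) (acc ++ [(i : Int)]) i (by omega)
        push_cast at this
        rw [this]
        simp
      · have := ih (i + 1) acc last (by omega)
        push_cast at this
        rw [this]
    · rw [PySem.List.pyRange_one_eq_nil (by exact_mod_cast Nat.le_of_not_lt hl), pvALoop,
        dif_neg hl]
      simp

-- while every index in [i, i+d) is too close to `last`, pvALoop just scans past it
theorem pv_skip (signals : List Bool) (md : Int) :
    ∀ (d i : Nat) (last : Int), (i : Int) + d ≤ last + md →
    pvALoop signals md i last = pvALoop signals md (i + d) last := by
  intro d
  induction d with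
  | zero => intro i last _; rfl
  | succ d ih =>
    intro i last h
    by_cases hl : i < signals.length
    · rw [pvALoop, dif_pos hl, if_neg (by push_cast at h; omega)]
      have e : i + (d + 1) = (i + 1) + d := by omega
      rw [e, ← ih (i + 1) last (by push_cast at h ⊢; omega)]
    · rw [pvALoop, dif_neg hl, pvALoop, dif_neg (by omega)]

-- main invariant: once the current index is out of reach of `last`, A's loop
-- behaves exactly like B's jumping loop
theorem pv_main (signals : List Bool) (md : Int) :
    ∀ (n i : Nat) (last : Int), signals.length - i ≤ n → (i : Int) - last ≥ md →
    pvALoop signals md i last = pvBLoop signals (if md > 0 then md.toNat else 1) i := by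
  intro n
  induction n with
  | zero =>
    intro i last h _
    rw [pvALoop, dif_neg (by omega), pvBLoop, dif_neg (by omega)]
  | succ n ih =>
    intro i last h hd
    by_cases hl : i < signals.length
    · rw [pvALoop, dif_pos hl, pvBLoop, dif_pos hl]
      by_cases hs : signals.getD i false = true
      · rw [if_pos ⟨hs, hd⟩, if_pos hs]
        by_cases hm : md > 0
        · have hstep : max (if md > 0 then md.toNat else 1) 1 = md.toNat := by
            simp [hm]; omega
          rw [hstep]
          have e : i + md.toNat = (i + 1) + (md.toNat - 1) := by omega
          rw [e, pv_skip signals md (md.toNat - 1) (i + 1) i (by push_cast; omega)]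
          rw [← e]
          exact congrArg _ (ih (i + md.toNat) (i : Int) (by omega) (by push_cast; omega))
        · have hstep : max (if md > 0 then md.toNat else 1) 1 = 1 := by simp [hm]
          rw [hstep]
          exact congrArg _ (ih (i + 1) (i : Int) (by omega) (by push_cast; omega))
      · rw [if_neg (fun hc => hs hc.1), if_neg hs]
        exact ih (i + 1) last (by omega) (by push_cast at hd ⊢; omega)
    · rw [pvALoop, dif_neg hl, pvBLoop, dif_neg hl]

-- ===== VERDICT (by name: the statement is the Claim_ definition above) =====
theorem reduce_signals_spec : Claim_equal_reduce_signals := by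
  intro signals md _
  unfold Spec_reduce_signals reduce_signals reduce_signals_alt
  have h0 : ((0 : Int)) = ((0 : Nat) : Int) := by norm_num
  rw [h0, pv_fold_eq signals md signals.length 0 [] (-md) (by omega)]
  rw [pv_main signals md signals.length 0 (-md) (by omega) (by omega)]
  simp
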